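-- pv_equiv track=rewrite | github.com/TheDarkAce92/SLCode | LSL Cache/skills/lsl-channel-map.py | extract_nth_arg
-- ===== SOURCE A (Python) =====
-- def extract_nth_arg(after_paren: str, n: int) -> str:
--     """Extract the nth (0-based) comma-separated argument from a function call body."""
--     depth   = 0
--     current = []
--     arg_idx = 0
--     for ch in after_paren:
--         if ch in "({[":
--             depth += 1
--             current.append(ch)
--         elif ch in ")}]":
--             if depth == 0:
--                 break
--             depth -= 1
--             current.append(ch)
--         elif ch == ',' and depth == 0:
--             if arg_idx == n:
--                 return "".join(current).strip()
--             arg_idx += 1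
--             current = []
--         else:
--             current.append(ch)
--     if arg_idx == n:
--         return "".join(current).strip()
--     return ""
-- ===== SOURCE B (Python) =====
-- def extract_nth_arg(after_paren: str, n: int) -> str:
--     """Extract the nth (0-based) comma-separated argument from a function call body.
--
--     Two-phase: first record the positions of all depth-0 commas and the stop
--     index (a depth-0 closing bracket or end of string), then slice the nth
--     argument straight out of the original string.
--     """
--     depth = 0
--     cuts = [0]                      # start index of each argument
--     stop = len(after_paren)
--     for i, ch in enumerate(after_paren):
--         if ch in "({[":
--             depth += 1
--         elif ch in ")}]":
--             if depth == 0: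
--                 stop = i
--                 break
--             depth -= 1
--         elif ch == ',' and depth == 0:
--             cuts.append(i + 1)
--     if 0 <= n < len(cuts):
--         end = cuts[n + 1] - 1 if n + 1 < len(cuts) else stop
--         return after_paren[cuts[n]:end].strip()
--     return ""
-- ===== Notes on version B (the rewrite author's own statement) =====
-- stated objective: alternative
-- what changed: Instead of accumulating the current argument's characters and early-returning at the nth top-level comma, B does one index-only scan recording depth-0 comma positions and the stop index, then derives the nth argument's boundaries and slices it out of the original string.
import Mathlib
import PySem

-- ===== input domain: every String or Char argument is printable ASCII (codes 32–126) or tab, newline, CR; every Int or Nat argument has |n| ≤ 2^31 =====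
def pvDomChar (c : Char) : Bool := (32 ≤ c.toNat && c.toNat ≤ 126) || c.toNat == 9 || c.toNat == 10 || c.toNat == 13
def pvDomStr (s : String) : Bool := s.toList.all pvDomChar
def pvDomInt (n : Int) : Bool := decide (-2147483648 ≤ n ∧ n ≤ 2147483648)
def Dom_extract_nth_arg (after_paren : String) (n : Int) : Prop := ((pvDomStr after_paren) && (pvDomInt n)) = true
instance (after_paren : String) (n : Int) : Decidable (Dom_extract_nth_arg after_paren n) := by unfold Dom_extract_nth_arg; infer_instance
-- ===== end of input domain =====

-- B replaces A's "accumulate characters and early-return at the nth top-level comma" by an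
-- index-only scan recording depth-0 comma positions plus the stop index, then slices the nth
-- argument out of the original string (objective: alternative decomposition, same O(len) cost).

-- ===== PORT A =====
def pvIsOpen (c : Char) : Bool := c == '(' || c == '{' || c == '['   -- ch in "({["
def pvIsClose (c : Char) : Bool := c == ')' || c == '}' || c == ']'  -- ch in ")}]"

-- A's loop; state = (depth, current, arg_idx); early `return` becomes returning the result.
def pvALoop (n : Int) : List Char → Int → List Char → Int → String
  | [], _depth, current, arg_idx =>
      if arg_idx == n then PySem.Str.strip (String.ofList current) else ""
  | ch :: rest, depth, current, arg_idx =>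
      if pvIsOpen ch then pvALoop n rest (depth + 1) (current ++ [ch]) arg_idx
      else if pvIsClose ch then
        if depth == 0 then
          -- `break`, then the after-loop check
          (if arg_idx == n then PySem.Str.strip (String.ofList current) else "")
        else pvALoop n rest (depth - 1) (current ++ [ch]) arg_idx
      else if ch == ',' && depth == 0 then
        if arg_idx == n then PySem.Str.strip (String.ofList current)
        else pvALoop n rest depth [] (arg_idx + 1)
      else pvALoop n rest depth (current ++ [ch]) arg_idx

def extract_nth_arg (after_paren : String) (n : Int) : String :=
  pvALoop n after_paren.toList 0 [] 0

-- ===== PORT B =====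
-- B's loop; state = (i, depth, cuts); returns (cuts, stop).
def pvBLoop (len : Nat) : List Char → Nat → Int → List Nat → List Nat × Nat
  | [], _i, _depth, cuts => (cuts, len)
  | ch :: rest, i, depth, cuts =>
      if pvIsOpen ch then pvBLoop len rest (i + 1) (depth + 1) cuts
      else if pvIsClose ch then
        if depth == 0 then (cuts, i)   -- stop = i; break
        else pvBLoop len rest (i + 1) (depth - 1) cuts
      else if ch == ',' && depth == 0 then pvBLoop len rest (i + 1) depth (cuts ++ [i + 1])
      else pvBLoop len rest (i + 1) depth cuts

def extract_nth_arg_alt (after_paren : String) (n : Int) : String :=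
  let cs := after_paren.toList
  let r := pvBLoop cs.length cs 0 0 [0]
  let cuts := r.1
  let stop := r.2
  if 0 ≤ n ∧ n < (cuts.length : Int) then
    let k := n.toNat
    let start := cuts.getD k 0
    let fin := if k + 1 < cuts.length then cuts.getD (k + 1) 0 - 1 else stop
    -- after_paren[start:fin].strip(); the take/drop slice is exact here since 0 ≤ start ≤ len
    -- and 0 ≤ fin (Nat subtraction gives the empty slice when fin < start, as Python does)
    PySem.Str.strip (String.ofList ((cs.drop start).take (fin - start)))
  else ""

-- ===== PRECONDITION & SPEC =====
def Spec_extract_nth_arg (after_paren : String) (n : Int) (out : String) : Prop := out = extract_nth_arg_alt after_paren n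
instance (after_paren : String) (n : Int) (out : String) : Decidable (Spec_extract_nth_arg after_paren n out) := by unfold Spec_extract_nth_arg; infer_instance

-- ===== CLAIM (what is proved, stated in full; the proofs are below) =====
def Claim_equal_extract_nth_arg : Prop := ∀ (after_paren : String) (n : Int), Dom_extract_nth_arg after_paren n → Spec_extract_nth_arg after_paren n (extract_nth_arg after_paren n)

-- ===== LEMMAS AND PROOFS =====

-- Reference decomposition: the list of top-level comma-separated segments (stopping at a
-- depth-0 close bracket); both ports are proved equal to indexing into this list.
def pvConsHead (c : Char) : List (List Char) → List (List Char)
  | [] => [[c]]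
  | s :: ss => (c :: s) :: ss

def pvSegs : List Char → Int → List (List Char)
  | [], _ => [[]]
  | ch :: rest, depth =>
      if pvIsOpen ch then pvConsHead ch (pvSegs rest (depth + 1))
      else if pvIsClose ch then
        if depth == 0 then [[]]
        else pvConsHead ch (pvSegs rest (depth - 1))
      else if ch == ',' && depth == 0 then [] :: pvSegs rest depth
      else pvConsHead ch (pvSegs rest depth)

theorem pvConsHead_ne_nil (c : Char) (L : List (List Char)) : pvConsHead c L ≠ [] := by
  cases L <;> simp [pvConsHead]

theorem pvSegs_ne_nil (cs : List Char) (d : Int) : pvSegs cs d ≠ [] := by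
  cases cs with
  | nil => simp [pvSegs]
  | cons ch rest =>
    simp only [pvSegs]
    split_ifs <;> simp [pvConsHead_ne_nil]

theorem pvConsHead_length (c : Char) (L : List (List Char)) (h : L ≠ []) :
    (pvConsHead c L).length = L.length := by
  cases L with
  | nil => exact absurd rfl h
  | cons s ss => simp [pvConsHead]

theorem pvConsHead_getD (c : Char) (L : List (List Char)) (h : L ≠ []) (k : Nat) :
    (pvConsHead c L).getD k [] =
      (if k = 0 then c :: L.getD 0 [] else L.getD k []) := by
  cases L with
  | nil => exact absurd rfl h
  | cons s ss =>
    cases k <;> simp [pvConsHead]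

theorem pvALoop_segs (n : Int) : ∀ (cs : List Char) (depth : Int) (cur : List Char) (idx : Int),
    pvALoop n cs depth cur idx =
      if idx ≤ n ∧ n < idx + (pvSegs cs depth).length then
        PySem.Str.strip (String.ofList
          ((if n = idx then cur else []) ++ (pvSegs cs depth).getD (n - idx).toNat []))
      else "" := by
  intro cs
  induction cs with
  | nil =>
    intro depth cur idx
    simp only [pvALoop, pvSegs]
    by_cases h : idx = n
    · subst h
      simp
    · rw [if_neg (show ¬ (idx == n) = true from by simpa using h),
        if_neg (show ¬ (idx ≤ n ∧ n < idx + (([[]] : List (List Char)).length : Int)) from by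
          simp only [List.length_singleton, Nat.cast_one]; omega)]
  | cons ch rest ih =>
    intro depth cur idx
    simp only [pvALoop, pvSegs]
    by_cases ho : pvIsOpen ch = true
    · simp only [if_pos ho]
      rw [ih]
      have hne := pvSegs_ne_nil rest (depth + 1)
      rw [pvConsHead_length ch _ hne]
      by_cases hc : idx ≤ n ∧ n < idx + (pvSegs rest (depth + 1)).length
      · simp only [if_pos hc]
        rw [pvConsHead_getD ch _ hne]
        by_cases h0 : n = idx
        · simp [h0]
        · have : (n - idx).toNat ≠ 0 := by omega
          simp [h0, this]
      · simp [hc]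
    · simp only [if_neg ho]
      by_cases hcl : pvIsClose ch = true
      · simp only [if_pos hcl]
        by_cases hd : depth = 0
        · subst hd
          simp only [if_pos (show ((0:Int) == 0) = true from by decide)]
          by_cases h : idx = n
          · subst h
            simp
          · rw [if_neg (show ¬ (idx == n) = true from by simpa using h),
              if_neg (show ¬ (idx ≤ n ∧ n < idx + (([[]] : List (List Char)).length : Int)) from by
                simp only [List.length_singleton, Nat.cast_one]; omega)]
        · simp only [if_neg (show ¬ (depth == 0) = true from by simp [hd])]
          rw [ih]
          have hne := pvSegs_ne_nil rest (depth - 1)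
          rw [pvConsHead_length ch _ hne]
          by_cases hc : idx ≤ n ∧ n < idx + (pvSegs rest (depth - 1)).length
          · simp only [if_pos hc]
            rw [pvConsHead_getD ch _ hne]
            by_cases h0 : n = idx
            · simp [h0]
            · have : (n - idx).toNat ≠ 0 := by omega
              simp [h0, this]
          · simp [hc]
      · simp only [if_neg hcl]
        by_cases hcm : (ch == ',' && depth == 0) = true
        · simp only [if_pos hcm]
          by_cases h : idx = n
          · subst h
            have : (idx ≤ idx ∧ idx < idx + ((pvSegs rest depth).length + 1)) := by
              constructor <;> omega
            simp [this]
          · simp only [if_neg (show ¬ (idx == n) = true from by simpa using h)]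
            rw [ih]
            simp only [ite_self, List.nil_append, List.length_cons]
            rw [if_neg (show ¬ (n = idx) from Ne.symm h)]
            simp only [List.nil_append]
            by_cases hc : idx + 1 ≤ n ∧ n < idx + 1 + ((pvSegs rest depth).length : Int)
            · rw [if_pos hc,
                if_pos (show idx ≤ n ∧ n < idx + (((pvSegs rest depth).length + 1 : Nat) : Int) from by
                  push_cast; omega)]
              have hk : (n - idx).toNat = (n - (idx + 1)).toNat + 1 := by omega
              rw [hk, List.getD_cons_succ]
            · rw [if_neg hc,
                if_neg (show ¬ (idx ≤ n ∧ n < idx + (((pvSegs rest depth).length + 1 : Nat) : Int)) from by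
                  push_cast; omega)]
        · simp only [if_neg hcm]
          rw [ih]
          have hne := pvSegs_ne_nil rest depth
          rw [pvConsHead_length ch _ hne]
          by_cases hc : idx ≤ n ∧ n < idx + (pvSegs rest depth).length
          · simp only [if_pos hc]
            rw [pvConsHead_getD ch _ hne]
            by_cases h0 : n = idx
            · simp [h0]
            · have : (n - idx).toNat ≠ 0 := by omega
              simp [h0, this]
          · simp [hc]

-- B's loop: accumulator lemma
theorem pvBLoop_acc (len : Nat) : ∀ (cs : List Char) (i : Nat) (depth : Int) (acc : List Nat),
    pvBLoop len cs i depth acc =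
      (acc ++ (pvBLoop len cs i depth []).1, (pvBLoop len cs i depth []).2) := by
  intro cs
  induction cs with
  | nil => intro i depth acc; simp [pvBLoop]
  | cons ch rest ih =>
    intro i depth acc
    simp only [pvBLoop]
    split_ifs with h1 h2 h3 h4
    · exact ih _ _ _
    · simp
    · exact ih _ _ _
    · rw [ih _ _ (acc ++ [i + 1]), ih _ _ ([] ++ [i + 1])]
      simp
    · exact ih _ _ _

-- bounds on the recorded cuts and stop index
theorem pvBLoop_bounds (len : Nat) : ∀ (cs : List Char) (i : Nat) (depth : Int),
    len = i + cs.length →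
      (∀ p ∈ (pvBLoop len cs i depth []).1, i + 1 ≤ p) ∧ i ≤ (pvBLoop len cs i depth []).2 := by
  intro cs
  induction cs with
  | nil => intro i depth h; simp [pvBLoop]; omega
  | cons ch rest ih =>
    intro i depth h
    have h' : len = (i + 1) + rest.length := by simp at h; omega
    simp only [pvBLoop]
    split_ifs with h1 h2 h3 h4
    · obtain ⟨ha, hb⟩ := ih (i + 1) (depth + 1) h'
      exact ⟨fun p hp => by have := ha p hp; omega, by omega⟩
    · simp
    · obtain ⟨ha, hb⟩ := ih (i + 1) (depth - 1) h'
      exact ⟨fun p hp => by have := ha p hp; omega, by omega⟩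
    · rw [pvBLoop_acc]
      obtain ⟨ha, hb⟩ := ih (i + 1) depth h'
      constructor
      · intro p hp
        simp at hp
        rcases hp with hp | hp
        · omega
        · have := ha p hp; omega
      · simpa using by omega
    · obtain ⟨ha, hb⟩ := ih (i + 1) depth h'
      exact ⟨fun p hp => by have := ha p hp; omega, by omega⟩

-- carve: the segments of the original string determined by boundaries and the stop index
def pvCarve (full : List Char) : List Nat → Nat → List (List Char)
  | [], _stop => []
  | [b], stop => [(full.drop b).take (stop - b)]
  | b1 :: b2 :: bs, stop => ((full.drop b1).take (b2 - 1 - b1)) :: pvCarve full (b2 :: bs) stop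

theorem pvCarve_length (full : List Char) : ∀ (bs : List Nat) (b : Nat) (stop : Nat),
    (pvCarve full (b :: bs) stop).length = bs.length + 1 := by
  intro bs
  induction bs with
  | nil => intro b stop; simp [pvCarve]
  | cons b2 bs' ih => intro b stop; simp [pvCarve, ih]

theorem pvCarve_getD (full : List Char) : ∀ (bs : List Nat) (b : Nat) (stop : Nat) (k : Nat),
    k < bs.length + 1 →
    (pvCarve full (b :: bs) stop).getD k [] =
      (full.drop ((b :: bs).getD k 0)).take
        ((if k + 1 < bs.length + 1 then (b :: bs).getD (k + 1) 0 - 1 else stop)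
          - (b :: bs).getD k 0) := by
  intro bs
  induction bs with
  | nil =>
    intro b stop k hk
    have hk0 : k = 0 := by simp only [List.length_nil] at hk; omega
    subst hk0
    simp [pvCarve]
  | cons b2 bs' ih =>
    intro b stop k hk
    cases k with
    | zero =>
      rw [if_pos (show 0 + 1 < (b2 :: bs').length + 1 from by simp)]
      simp [pvCarve]
    | succ k' =>
      have hk2 : k' < bs'.length + 1 := by simp only [List.length_cons] at hk; omega
      have hix := ih b2 stop k' hk2
      simp only [pvCarve, List.getD_cons_succ, List.length_cons] at hix ⊢
      rw [hix]
      by_cases hq : k' + 1 < bs'.length + 1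
      · rw [if_pos hq, if_pos (show k' + 1 + 1 < bs'.length + 1 + 1 from by omega)]
      · rw [if_neg hq, if_neg (show ¬ (k' + 1 + 1 < bs'.length + 1 + 1) from by omega)]

-- one scan step extends the first carved segment by the scanned character
theorem pvCarve_cons_step (full : List Char) (i : Nat) (P : List Nat) (S : Nat) (ch : Char)
    (hdrop : full.drop i = ch :: full.drop (i + 1))
    (hbP : ∀ p ∈ P, i + 2 ≤ p) (hbS : i + 1 ≤ S) :
    pvCarve full (i :: P) S = pvConsHead ch (pvCarve full ((i + 1) :: P) S) := by
  cases P with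
  | nil =>
    simp only [pvCarve, pvConsHead]
    rw [hdrop]
    have hS : S - i = (S - (i + 1)) + 1 := by omega
    rw [hS, List.take_succ_cons]
  | cons p ps =>
    have hp : i + 2 ≤ p := hbP p (by simp)
    simp only [pvCarve, pvConsHead]
    rw [hdrop]
    have hP : p - 1 - i = (p - 1 - (i + 1)) + 1 := by omega
    rw [hP, List.take_succ_cons]

theorem pvDropAppend {a : Type} : ∀ (pre suf : List a) (k : Nat),
    (pre ++ suf).drop (pre.length + k) = suf.drop k := by
  intro pre
  induction pre with
  | nil => intro suf k; simp
  | cons x l ih =>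
    intro suf k
    have h : (x :: l).length + k = (l.length + k) + 1 := by simp only [List.length_cons]; omega
    rw [h]
    simp only [List.cons_append, List.drop_succ_cons]
    exact ih suf k

-- the recorded cuts/stop carve the string into exactly pvSegs
theorem pvBLoop_carve : ∀ (cs pre : List Char) (depth : Int),
    pvCarve (pre ++ cs)
        (pre.length :: (pvBLoop (pre ++ cs).length cs pre.length depth []).1)
        (pvBLoop (pre ++ cs).length cs pre.length depth []).2
      = pvSegs cs depth := by
  intro cs
  induction cs with
  | nil =>
    intro pre depth
    simp [pvBLoop, pvCarve, pvSegs]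
  | cons ch rest ih =>
    intro pre depth
    have hfull : pre ++ ch :: rest = (pre ++ [ch]) ++ rest := by simp
    have hlen : (pre ++ [ch]).length = pre.length + 1 := by simp
    have hlen2 : (pre ++ ch :: rest).length = (pre.length + 1) + rest.length := by
      simp only [List.length_append, List.length_cons]; omega
    have hdrop : (pre ++ ch :: rest).drop pre.length
        = ch :: ((pre ++ ch :: rest).drop (pre.length + 1)) := by
      have h0 := pvDropAppend pre (ch :: rest) 0
      have hd1 := pvDropAppend pre (ch :: rest) 1
      simp only [Nat.add_zero] at h0
      rw [h0, hd1]
      simp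
    simp only [pvBLoop, pvSegs]
    split_ifs with h1 h2 h3 h4
    · -- open bracket
      have hb := pvBLoop_bounds (pre ++ ch :: rest).length rest (pre.length + 1) (depth + 1) hlen2
      have hih := ih (pre ++ [ch]) (depth + 1)
      rw [hlen, ← hfull] at hih
      rw [← hih]
      exact pvCarve_cons_step _ _ _ _ ch hdrop
        (fun p hp => by have := hb.1 p hp; omega) hb.2
    · -- close bracket at depth 0
      simp [pvCarve]
    · -- close bracket at depth > 0
      have hb := pvBLoop_bounds (pre ++ ch :: rest).length rest (pre.length + 1) (depth - 1) hlen2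
      have hih := ih (pre ++ [ch]) (depth - 1)
      rw [hlen, ← hfull] at hih
      rw [← hih]
      exact pvCarve_cons_step _ _ _ _ ch hdrop
        (fun p hp => by have := hb.1 p hp; omega) hb.2
    · -- comma at depth 0
      rw [pvBLoop_acc]
      have hih := ih (pre ++ [ch]) depth
      rw [hlen, ← hfull] at hih
      rw [← hih]
      have h0 : (pre.length + 1) - 1 - pre.length = 0 := by omega
      simp only [List.nil_append, List.singleton_append, pvCarve, h0, List.take_zero]
    · -- ordinary character
      have hb := pvBLoop_bounds (pre ++ ch :: rest).length rest (pre.length + 1) depth hlen2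
      have hih := ih (pre ++ [ch]) depth
      rw [hlen, ← hfull] at hih
      rw [← hih]
      exact pvCarve_cons_step _ _ _ _ ch hdrop
        (fun p hp => by have := hb.1 p hp; omega) hb.2

-- B in terms of pvSegs
theorem extract_nth_arg_alt_segs (s : String) (n : Int) :
    extract_nth_arg_alt s n =
      if 0 ≤ n ∧ n < ((pvSegs s.toList 0).length : Int) then
        PySem.Str.strip (String.ofList ((pvSegs s.toList 0).getD n.toNat []))
      else "" := by
  unfold extract_nth_arg_alt
  have hacc := pvBLoop_acc s.toList.length s.toList 0 0 [0]
  have hcarve := pvBLoop_carve s.toList [] 0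
  simp only [List.nil_append, List.length_nil] at hcarve
  set P := (pvBLoop s.toList.length s.toList 0 0 []).1 with hPdef
  set S := (pvBLoop s.toList.length s.toList 0 0 []).2 with hSdef
  have hr1 : (pvBLoop s.toList.length s.toList 0 0 [0]).1 = 0 :: P := by rw [hacc]; simp
  have hr2 : (pvBLoop s.toList.length s.toList 0 0 [0]).2 = S := by rw [hacc]
  have hlen : (pvSegs s.toList 0).length = P.length + 1 := by
    rw [← hcarve, pvCarve_length]
  simp only [hr1, hr2]
  by_cases hc : 0 ≤ n ∧ n < ((0 :: P).length : Int)
  · have hlc : (0 :: P).length = (pvSegs s.toList 0).length := by simp [hlen]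
    have hc' : 0 ≤ n ∧ n < ((pvSegs s.toList 0).length : Int) := by rw [← hlc]; exact hc
    simp only [if_pos hc, if_pos hc']
    have hk : n.toNat < P.length + 1 := by
      have := hc.2; simp at this; omega
    have hgd := pvCarve_getD s.toList P 0 S n.toNat hk
    rw [← hcarve, hgd]
    simp only [List.length_cons]
    rfl
  · have hlc : (0 :: P).length = (pvSegs s.toList 0).length := by simp [hlen]
    have hc' : ¬ (0 ≤ n ∧ n < ((pvSegs s.toList 0).length : Int)) := by rw [← hlc]; exact hc
    rw [if_neg hc, if_neg hc']

-- ===== VERDICT (by name: the statement is the Claim_ definition above) =====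
theorem extract_nth_arg_spec : Claim_equal_extract_nth_arg := by
  intro s n _hdom
  unfold Spec_extract_nth_arg
  rw [extract_nth_arg_alt_segs]
  unfold extract_nth_arg
  rw [pvALoop_segs]
  by_cases hc : 0 ≤ n ∧ n < ((pvSegs s.toList 0).length : Int)
  · have hc' : (0 : Int) ≤ n ∧ n < 0 + (pvSegs s.toList 0).length := by
      exact ⟨hc.1, by have := hc.2; omega⟩
    simp only [if_pos hc, if_pos hc']
    have : n - 0 = n := by omega
    by_cases h0 : n = 0 <;> simp [h0, this]
  · have hc' : ¬ ((0 : Int) ≤ n ∧ n < 0 + (pvSegs s.toList 0).length) := by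
      intro h; exact hc ⟨h.1, by have := h.2; omega⟩
    simp [hc]
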